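-- pv_equiv track=rewrite | github.com/witchakornb/Lab7-White-box-testing | clumpcount/src/CountClump.py | count_clumps
-- ===== SOURCE A (Python) =====
-- def count_clumps(nums):
--   """
--   Counts the number of "clumps" in a list of integers.
--   A clump is a run of 2 or more of the same adjacent numbers.
--
--   Args:
--     nums: A list of integers.
--
--   Returns:
--     The number of clumps in the list.
--   """
--   if nums is None or len(nums) == 0:
--     return 0
--
--   count = 0
--   prev = nums[0]
--   in_clump = False
--
--   for i in range(1, len(nums)):
--     if nums[i] == prev and not in_clump:
--       in_clump = True
--       count += 1
--     elif nums[i] != prev: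
--       prev = nums[i]
--       in_clump = False
--
--   return count
-- ===== SOURCE B (Python) =====
-- def count_clumps(nums):
--   # Two-pointer run scan: split the list into maximal runs of equal values,
--   # count the runs of length >= 2.
--   if not nums:
--     return 0
--   count = 0
--   i = 0
--   n = len(nums)
--   while i < n:
--     j = i
--     while j < n and nums[j] == nums[i]:
--       j += 1
--     if j - i >= 2:
--       count += 1
--     i = j
--   return count
-- ===== Notes on version B (the rewrite author's own statement) =====
-- stated objective: alternative
-- what changed: Replaces A's prev/in_clump flag-tracking scan with a two-pointer scan that advances over each maximal run of equal values and counts the runs of length >= 2.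
import Mathlib
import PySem

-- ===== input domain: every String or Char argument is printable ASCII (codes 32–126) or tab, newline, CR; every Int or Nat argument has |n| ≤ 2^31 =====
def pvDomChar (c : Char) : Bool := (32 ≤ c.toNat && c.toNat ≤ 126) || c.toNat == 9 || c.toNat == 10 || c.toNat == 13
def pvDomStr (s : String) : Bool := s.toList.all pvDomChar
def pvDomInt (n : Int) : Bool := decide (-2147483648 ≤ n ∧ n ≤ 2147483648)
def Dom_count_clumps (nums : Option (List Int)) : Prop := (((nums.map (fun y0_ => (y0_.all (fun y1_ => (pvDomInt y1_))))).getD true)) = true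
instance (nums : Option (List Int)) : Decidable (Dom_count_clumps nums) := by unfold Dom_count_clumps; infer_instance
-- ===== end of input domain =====

-- B replaces A's prev/in_clump flag-tracking scan with a run-splitting scan
-- (count maximal runs of length >= 2); alternative decomposition, same cost.


-- ===== PORT A =====
-- A's loop state: (count, prev, in_clump); the for-loop over range(1, len) is
-- the fold of this step over the tail of the list.
def ccStepA (s : Int × Int × Bool) (x : Int) : Int × Int × Bool :=
  if x == s.2.1 && !s.2.2 then (s.1 + 1, s.2.1, true)
  else if x != s.2.1 then (s.1, x, false)
  else s

def count_clumps (nums : Option (List Int)) : Int :=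
  match nums with
  | none => 0
  | some l =>
    match l with
    | [] => 0
    | p :: rest => (rest.foldl ccStepA (0, p, false)).1

-- ===== PORT B =====
-- B's outer while-loop: each iteration consumes one maximal run (the inner
-- while-loop j-advance = takeWhile/dropWhile) and counts it if its length ≥ 2.
def ccRuns : List Int → Int
  | [] => 0
  | x :: xs =>
      (if xs.takeWhile (fun y => y == x) ≠ [] then (1 : Int) else 0)
        + ccRuns (xs.dropWhile (fun y => y == x))
termination_by l => l.length
decreasing_by
  simp only [List.length_cons]
  exact Nat.lt_succ_of_le (List.length_dropWhile_le _ _)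

def count_clumps_alt (nums : Option (List Int)) : Int :=
  match nums with
  | none => 0
  | some l => ccRuns l

-- ===== PRECONDITION & SPEC =====
def Spec_count_clumps (nums : Option (List Int)) (out : Int) : Prop := out = count_clumps_alt nums
instance (nums : Option (List Int)) (out : Int) : Decidable (Spec_count_clumps nums out) := by unfold Spec_count_clumps; infer_instance

-- ===== CLAIM (what is proved, stated in full; the proofs are below) =====
def Claim_equal_count_clumps : Prop := ∀ (nums : Option (List Int)), Dom_count_clumps nums → Spec_count_clumps nums (count_clumps nums)

-- ===== LEMMAS AND PROOFS =====

-- Joint loop invariant for A's fold, covering both values of the in_clump flag.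
theorem ccFold_invariant (l : List Int) :
    ∀ (p c : Int),
      ((l.foldl ccStepA (c, p, false)).1 = c + ccRuns (p :: l)) ∧
      ((l.foldl ccStepA (c, p, true)).1 = c + ccRuns (l.dropWhile (fun y => y == p))) := by
  induction l with
  | nil =>
      intro p c
      refine ⟨by simp [List.foldl, ccRuns], by simp [List.foldl, ccRuns]⟩
  | cons x xs ih =>
      intro p c
      have hrw : ∀ (q : Int) (ys : List Int), ccRuns (q :: ys)
          = (if ys.takeWhile (fun y => y == q) ≠ [] then (1 : Int) else 0)
            + ccRuns (ys.dropWhile (fun y => y == q)) := by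
        intro q ys; rw [ccRuns]
      constructor
      · by_cases h : x = p
        · subst h
          have : (x :: xs).foldl ccStepA (c, x, false) = xs.foldl ccStepA (c + 1, x, true) := by
            simp [List.foldl, ccStepA]
          rw [this, (ih x (c + 1)).2, hrw x (x :: xs)]
          simp [List.takeWhile, List.dropWhile]
          ring
        · have hb : (x == p) = false := by simp [h]
          have : (x :: xs).foldl ccStepA (c, p, false) = xs.foldl ccStepA (c, x, false) := by
            simp [List.foldl, ccStepA, hb, h]
          rw [this, (ih x c).1, hrw p (x :: xs)]
          simp [List.takeWhile, List.dropWhile, hb]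
      · by_cases h : x = p
        · subst h
          have : (x :: xs).foldl ccStepA (c, x, true) = xs.foldl ccStepA (c, x, true) := by
            simp [List.foldl, ccStepA]
          rw [this, (ih x c).2]
          simp [List.dropWhile]
        · have hb : (x == p) = false := by simp [h]
          have : (x :: xs).foldl ccStepA (c, p, true) = xs.foldl ccStepA (c, x, false) := by
            simp [List.foldl, ccStepA, hb, h]
          rw [this, (ih x c).1]
          simp [List.dropWhile, hb]

-- ===== VERDICT (by name: the statement is the Claim_ definition above) =====
theorem count_clumps_spec : Claim_equal_count_clumps := by
  intro nums _
  unfold Spec_count_clumps count_clumps count_clumps_alt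
  match nums with
  | none => rfl
  | some [] => simp [ccRuns]
  | some (p :: rest) =>
      simp only
      rw [(ccFold_invariant rest p 0).1]
      ring
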